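-- pv_equiv track=rewrite | github.com/juhongyee/baekjoon | 282 이진 삼진 탐색 놀이/이진 삼진 탐색 놀이 3.py | t_search
-- ===== SOURCE A (Python) =====
-- def t_search(left,right,count,flag):
--     if left>right:
--         return count-flag
--     diff = (right-left)//3
--     left_t = left+diff
--     right_t = right-diff
--
--     if(left_t==right_t):
--         return max(t_search(right_t+1,right,count+1,1),t_search(left_t+1,right_t-1,count+1,1))
--     else:
--         return t_search(right_t+1,right,count+2,2)
-- ===== SOURCE B (Python) =====
-- def t_search(left, right, count, flag):
--     if left > right:
--         return count - flag
--     n = right - left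
--     while n > 2:
--         count += 2
--         n = n // 3 - 1
--     return count
-- ===== Notes on version B (the rewrite author's own statement) =====
-- stated objective: simpler
-- what changed: Replaced A's tail recursion carrying left/right/count/flag (with a max over two trivial base-case calls) by a simple while-loop over the interval length n alone (n = n//3 - 1 per step, +2 per step), with no flag bookkeeping.
import Mathlib
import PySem

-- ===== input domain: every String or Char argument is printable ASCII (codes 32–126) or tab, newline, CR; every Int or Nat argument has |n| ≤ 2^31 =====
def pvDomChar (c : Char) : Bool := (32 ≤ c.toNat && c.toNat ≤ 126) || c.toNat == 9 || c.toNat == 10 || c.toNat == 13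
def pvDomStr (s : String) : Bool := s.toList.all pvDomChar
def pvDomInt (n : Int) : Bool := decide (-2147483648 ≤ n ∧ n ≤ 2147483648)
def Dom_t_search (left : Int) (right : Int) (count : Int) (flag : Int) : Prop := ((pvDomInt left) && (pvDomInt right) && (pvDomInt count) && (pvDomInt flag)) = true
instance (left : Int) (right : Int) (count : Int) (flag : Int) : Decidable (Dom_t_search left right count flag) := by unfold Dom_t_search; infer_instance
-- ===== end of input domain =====

-- B replaces A's recursion carrying left/right/count/flag (with a max over two trivial
-- base-case calls) by a simple loop over the interval length alone (objective: simpler).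

-- ===== PORT A =====
-- termination lemmas for the ports (cited by name in decreasing_by; kept elementary on purpose)
theorem pv_decA1 (left right : Int) (h : ¬ left > right) :
    (right - (right - PySem.Int.floordiv (right - left) 3 + 1) + 1).toNat < (right - left + 1).toNat := by
  have hn : 0 ≤ right - left := sub_nonneg.mpr (not_lt.mp h)
  have hd : right - (right - PySem.Int.floordiv (right - left) 3 + 1) + 1
      = PySem.Int.floordiv (right - left) 3 := by ring
  rw [hd, PySem.Int.floordiv_eq_ediv_of_pos (by decide : (0:Int) < 3)]
  exact (Int.toNat_lt_toNat (Int.lt_add_one_iff.mpr hn)).mpr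
    (lt_of_le_of_lt (Int.ediv_le_self 3 hn) (lt_add_one _))

theorem pv_decA2 (left right : Int) (h : ¬ left > right) :
    (right - PySem.Int.floordiv (right - left) 3 - 1 -
      (left + PySem.Int.floordiv (right - left) 3 + 1) + 1).toNat < (right - left + 1).toNat := by
  have hn : 0 ≤ right - left := sub_nonneg.mpr (not_lt.mp h)
  have hd0 : 0 ≤ PySem.Int.floordiv (right - left) 3 := by
    rw [PySem.Int.floordiv_eq_ediv_of_pos (by decide : (0:Int) < 3)]
    exact Int.ediv_nonneg hn (by decide)
  refine (Int.toNat_lt_toNat (Int.lt_add_one_iff.mpr hn)).mpr ?_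
  have := add_le_add hd0 hd0
  linarith

def t_search (left : Int) (right : Int) (count : Int) (flag : Int) : Int :=
  if h : left > right then count - flag
  else
    let diff := PySem.Int.floordiv (right - left) 3
    let left_t := left + diff
    let right_t := right - diff
    if left_t = right_t then
      max (t_search (right_t + 1) right (count + 1) 1)
          (t_search (left_t + 1) (right_t - 1) (count + 1) 1)
    else
      t_search (right_t + 1) right (count + 2) 2
termination_by (right - left + 1).toNat
decreasing_by
  · exact pv_decA1 left right h
  · exact pv_decA2 left right h
  · exact pv_decA1 left right h

-- ===== PORT B =====
theorem pv_decB (n : Int) (h : 2 < n) : (PySem.Int.floordiv n 3 - 1).toNat < n.toNat := by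
  rw [PySem.Int.floordiv_eq_ediv_of_pos (by decide : (0:Int) < 3)]
  have hn : 0 ≤ n := le_of_lt (lt_trans (by decide : (0:Int) < 2) h)
  have h2 : n / 3 ≤ n := Int.ediv_le_self 3 hn
  exact (Int.toNat_lt_toNat (lt_trans (by decide : (0:Int) < 2) h)).mpr
    (lt_of_lt_of_le (sub_one_lt _) h2)

-- the 'while n > 2' loop of Source B
def tAltLoop (n : Int) (count : Int) : Int :=
  if h : n > 2 then tAltLoop (PySem.Int.floordiv n 3 - 1) (count + 2) else count
termination_by n.toNat
decreasing_by exact pv_decB n h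

def t_search_alt (left : Int) (right : Int) (count : Int) (flag : Int) : Int :=
  if left > right then count - flag
  else tAltLoop (right - left) count

-- ===== PRECONDITION & SPEC =====
def Spec_t_search (left : Int) (right : Int) (count : Int) (flag : Int) (out : Int) : Prop := out = t_search_alt left right count flag
instance (left : Int) (right : Int) (count : Int) (flag : Int) (out : Int) : Decidable (Spec_t_search left right count flag out) := by unfold Spec_t_search; infer_instance

-- ===== CLAIM (what is proved, stated in full; the proofs are below) =====
def Claim_equal_t_search : Prop := ∀ (left : Int) (right : Int) (count : Int) (flag : Int), Dom_t_search left right count flag → Spec_t_search left right count flag (t_search left right count flag)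

-- ===== LEMMAS AND PROOFS =====

-- ===== VERDICT (by name: the statement is the Claim_ definition above) =====
theorem tAlt_main : ∀ (k : Nat) (left right count flag : Int),
    left ≤ right → (right - left).toNat = k →
    t_search left right count flag = tAltLoop (right - left) count := by
  intro k
  induction k using Nat.strong_induction_on with
  | _ k ih =>
    intro left right count flag hle hk
    rw [t_search, dif_neg (not_lt.mpr hle)]
    simp only [PySem.Int.floordiv_eq_ediv_of_pos (by norm_num : (0:Int) < 3)]
    by_cases h0 : right - left = 0
    · rw [if_pos (by omega)]
      rw [t_search, dif_pos (by omega)]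
      rw [t_search, dif_pos (by omega)]
      rw [tAltLoop, dif_neg (by omega)]
      simp
    · rw [if_neg (by omega)]
      by_cases h2 : right - left ≤ 2
      · rw [t_search, dif_pos (by omega)]
        rw [tAltLoop, dif_neg (by omega)]
        ring
      · have hm : ((right - left) / 3 - 1).toNat < k := by omega
        have hih := ih ((right - left) / 3 - 1).toNat hm
          (right - (right - left) / 3 + 1) right (count + 2) 2 (by omega) (by omega)
        rw [show right - (right - (right - left) / 3 + 1) = (right - left) / 3 - 1 from by ring] at hih
        rw [hih]
        conv_rhs => rw [tAltLoop]
        rw [dif_pos (by omega)]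
        simp only [PySem.Int.floordiv_eq_ediv_of_pos (by norm_num : (0:Int) < 3)]

theorem t_search_spec : Claim_equal_t_search := by
  intro left right count flag _
  unfold Spec_t_search t_search_alt
  by_cases h : left > right
  · rw [t_search]; simp [h]
  · rw [if_neg h]
    exact tAlt_main _ left right count flag (not_lt.mp h) rfl
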